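-- pv_equiv track=rewrite | github.com/wqdchn/geektime | algorithm-40case/hash_table/single_number.py | singleNumber4
-- ===== SOURCE A (Python) =====
-- def singleNumber4(nums):
--     total = 0
--     mp = {}
--
--     for num in nums:
--         if num in mp:
--             total -= num
--         else:
--             total += num
--
--         mp[num] = True
--
--     return total
-- ===== SOURCE B (Python) =====
-- def singleNumber4(nums):
--     # closed form: each distinct value counts +1 once and -1 for each repeat,
--     # i.e. total = sum over distinct v of v*(2-count(v)) = 2*sum(set) - sum(all)
--     return 2 * sum(set(nums)) - sum(nums)
-- ===== Notes on version B (the rewrite author's own statement) =====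
-- stated objective: simpler
-- what changed: Replaced the per-element add/subtract loop with a dict of seen values by the closed form 2*sum(set(nums)) - sum(nums).
import Mathlib
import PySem

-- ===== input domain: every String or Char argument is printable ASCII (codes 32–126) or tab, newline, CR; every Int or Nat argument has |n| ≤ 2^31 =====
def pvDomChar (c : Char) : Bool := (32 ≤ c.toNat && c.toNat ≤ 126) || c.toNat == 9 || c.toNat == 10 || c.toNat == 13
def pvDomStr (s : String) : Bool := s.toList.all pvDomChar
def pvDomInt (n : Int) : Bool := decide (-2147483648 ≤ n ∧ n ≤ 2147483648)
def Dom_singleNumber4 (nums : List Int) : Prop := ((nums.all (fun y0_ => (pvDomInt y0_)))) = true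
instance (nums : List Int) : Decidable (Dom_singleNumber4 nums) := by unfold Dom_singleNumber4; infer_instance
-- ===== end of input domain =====

-- B changes A's per-occurrence add/subtract loop into the closed form 2*sum(set(nums)) - sum(nums); objective: simpler.

-- ===== PORT A =====
def singleNumber4 (nums : List Int) : Int :=
  (nums.foldl
    (fun (st : Int × PySem.Dict Int Bool) num =>
      let total := if st.2.contains num then st.1 - num else st.1 + num
      (total, st.2.insert num true))
    (0, PySem.Dict.empty)).1

-- ===== PORT B =====
def singleNumber4_alt (nums : List Int) : Int :=
  2 * (PySem.Set.ofList nums).sum - nums.sum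

-- ===== PRECONDITION & SPEC =====
def Spec_singleNumber4 (nums : List Int) (out : Int) : Prop := out = singleNumber4_alt nums
instance (nums : List Int) (out : Int) : Decidable (Spec_singleNumber4 nums out) := by unfold Spec_singleNumber4; infer_instance

-- ===== CLAIM (what is proved, stated in full; the proofs are below) =====
def Claim_equal_singleNumber4 : Prop := ∀ (nums : List Int), Dom_singleNumber4 nums → Spec_singleNumber4 nums (singleNumber4 nums)

-- ===== LEMMAS AND PROOFS =====

/-- The signed contribution of the remaining elements, given the set of values seen so far. -/
def pvF : List Int → PySem.Set Int → Int
  | [], _ => 0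
  | x :: xs, s => (if x ∈ s then -x else x) + pvF xs (PySem.Set.add s x)

theorem pvLoop_eq_F (nums : List Int) : ∀ (t : Int) (d : PySem.Dict Int Bool) (s : PySem.Set Int),
    (∀ x, d.contains x = true ↔ x ∈ s) →
    (nums.foldl
      (fun (st : Int × PySem.Dict Int Bool) num =>
        let total := if st.2.contains num then st.1 - num else st.1 + num
        (total, st.2.insert num true))
      (t, d)).1 = t + pvF nums s := by
  induction nums with
  | nil => intro t d s h; simp only [List.foldl_nil, pvF]; omega
  | cons x xs ih =>
    intro t d s h
    have hstep : ∀ y, (d.insert x true).contains y = true ↔ y ∈ PySem.Set.add s x := by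
      intro y
      rw [PySem.Dict.contains_insert, Bool.or_eq_true, beq_iff_eq, h y, PySem.Set.mem_add]
      exact or_comm
    simp only [List.foldl_cons, pvF]
    by_cases hx : x ∈ s
    · have hc : d.contains x = true := (h x).2 hx
      simp only [hc, reduceIte]
      rw [ih (t - x) _ _ hstep]
      simp [hx]; ring
    · have hc : d.contains x = false := by
        by_contra hcc
        exact hx ((h x).1 (by simpa using hcc))
      simp only [hc, Bool.false_eq_true, reduceIte]
      rw [ih (t + x) _ _ hstep]
      simp [hx]; ring

theorem pvF_closed (xs : List Int) : ∀ (s : PySem.Set Int),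
    pvF xs s = 2 * ((PySem.Set.update s xs).sum - s.sum) - xs.sum := by
  induction xs with
  | nil => intro s; simp [pvF, PySem.Set.update]
  | cons x xs ih =>
    intro s
    have hupd : PySem.Set.update s (x :: xs) = PySem.Set.update (PySem.Set.add s x) xs := by
      simp [PySem.Set.update]
    by_cases hx : x ∈ s
    · have hadd : PySem.Set.add s x = s := by
        simp [PySem.Set.add, hx]
      rw [pvF, hupd, hadd, ih s]
      simp [hx]; ring
    · have hadd : PySem.Set.add s x = s ++ [x] := by
        simp [PySem.Set.add, hx]
      rw [pvF, hupd, hadd, ih (s ++ [x])]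
      simp [hx]; ring

-- ===== VERDICT (by name: the statement is the Claim_ definition above) =====
theorem singleNumber4_spec : Claim_equal_singleNumber4 := by
  intro nums _
  unfold Spec_singleNumber4 singleNumber4 singleNumber4_alt
  rw [pvLoop_eq_F nums 0 PySem.Dict.empty [] (by intro x; simp)]
  rw [pvF_closed nums []]
  rw [← PySem.Set.update_nil_left]
  simp
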